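-- pv_equiv track=rewrite | github.com/MrBrantCode/unitest_baseline | mut_generate/mist_train_taco/taco_7548/solution.py | min_operations_to_make_tree_good
-- ===== SOURCE A (Python) =====
-- from collections import defaultdict
--
-- def min_operations_to_make_tree_good(n, a, edges):
--     G = [[] for _ in range(n)]
--     for x, y in edges:
--         G[x - 1].append(y - 1)
--         G[y - 1].append(x - 1)
--
--     B = [0] * n
--     vals = defaultdict(set)
--     res = [0]
--
--     def fill_dfs(v, p):
--         B[v] = a[v]
--         if p != -1:
--             B[v] ^= B[p]
--         for u in G[v]:
--             if u != p:
--                 fill_dfs(u, v)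
--
--     def calc_dfs(v, p):
--         zero = False
--         vals[v].add(B[v])
--         for u in G[v]:
--             if u != p:
--                 calc_dfs(u, v)
--                 if len(vals[v]) < len(vals[u]):
--                     (vals[v], vals[u]) = (vals[u], vals[v])
--                 for x in vals[u]:
--                     zero |= x ^ a[v] in vals[v]
--                 for x in vals[u]:
--                     vals[v].add(x)
--                 vals[u].clear()
--         if zero:
--             res[0] += 1
--             vals[v].clear()
--
--     fill_dfs(0, -1)
--     calc_dfs(0, -1)
--     return res[0]
-- ===== SOURCE B (Python) =====
-- def min_operations_to_make_tree_good(n, a, edges):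
--     G = [[] for _ in range(n)]
--     for x, y in edges:
--         G[x - 1].append(y - 1)
--         G[y - 1].append(x - 1)
--
--     # One purely functional DFS: prefix-xor is threaded down as `acc`,
--     # each call returns (set of prefix-xors kept in the subtree, cuts made).
--     def dfs(v, p, acc):
--         b = acc ^ a[v]
--         s = {b}
--         cuts = 0
--         zero = False
--         for u in G[v]:
--             if u != p:
--                 cs, cc = dfs(u, v, b)
--                 cuts += cc
--                 for x in cs:
--                     if x ^ a[v] in s:
--                         zero = True
--                 for x in cs:
--                     s.add(x)
--         if zero:
--             return set(), cuts + 1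
--         return s, cuts
--
--     return dfs(0, -1, 0)[1]
-- ===== Notes on version B (the rewrite author's own statement) =====
-- stated objective: simpler
-- what changed: B replaces A's two recursive passes over global mutable state (a prefix-xor array filled first, then a defaultdict of sets merged small-to-large with swaps, clears and a res cell) by one purely functional DFS that threads the prefix xor down and returns (kept-set, cuts) per subtree, with plain set union instead of the size-based swap.
-- outside the precondition, e.g. on min_operations_to_make_tree_good(1, [1], [(1, 1)]): A returns 0, B returns 1; on min_operations_to_make_tree_good(2, [1, 1], [(1, 2), (1, 2)]): A returns 1, B returns 1; on min_operations_to_make_tree_good(2, [3, -3, 0, 1], [(1, 1), (1, 2), (1, 1), (1, 1), (1, 2), (1, 0)]): A returns 0, B returns 1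
import Mathlib
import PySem

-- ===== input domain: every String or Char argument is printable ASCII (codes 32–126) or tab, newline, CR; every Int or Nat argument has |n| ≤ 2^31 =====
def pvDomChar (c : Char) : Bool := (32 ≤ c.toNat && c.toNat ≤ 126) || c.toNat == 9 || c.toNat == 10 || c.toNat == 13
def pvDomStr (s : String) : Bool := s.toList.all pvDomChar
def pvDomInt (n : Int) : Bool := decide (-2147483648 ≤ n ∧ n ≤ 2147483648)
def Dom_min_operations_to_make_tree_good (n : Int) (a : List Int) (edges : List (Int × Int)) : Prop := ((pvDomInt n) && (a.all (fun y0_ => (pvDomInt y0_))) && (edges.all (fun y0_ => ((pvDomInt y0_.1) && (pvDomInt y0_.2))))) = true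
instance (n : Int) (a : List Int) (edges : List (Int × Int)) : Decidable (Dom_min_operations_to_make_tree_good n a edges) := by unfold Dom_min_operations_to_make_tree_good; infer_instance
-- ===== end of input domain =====

-- B rewrites A's two recursive passes over global mutable state as one purely functional DFS
-- returning (kept-set, cuts) per subtree (objective: simpler); equivalence is proved on Pre_ below.

-- ===== PORT A =====
-- adjacency build: the three 'G' lines, identical in Source A and Source B (shared helper)
def pvGraph (n : Int) (edges : List (Int × Int)) : List (List Int) :=
  edges.foldl (fun G e =>
    let G1 := PySem.List.pySetD G (e.1 - 1) (PySem.List.pyGetD G (e.1 - 1) [] ++ [e.2 - 1])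
    PySem.List.pySetD G1 (e.2 - 1) (PySem.List.pyGetD G1 (e.2 - 1) [] ++ [e.1 - 1]))
    (List.replicate n.toNat [])

-- fill_dfs: B[v] = a[v] (^ B[p] if p != -1), then recurse into children; fuel bounds the
-- recursion depth (n+1 suffices on every input admitted by Pre_); the loop body over G[v]
-- is the named helper pvFillAStep
def pvFillAStep (recur : Int → Int → List Int → List Int) (v p : Int)
    (B : List Int) (u : Int) : List Int :=
  if u ≠ p then recur u v B else B

def pvFillA (G : List (List Int)) (a : List Int) : Nat → Int → Int → List Int → List Int
  | 0, _, _, Barr => Barr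
  | f+1, v, p, Barr =>
    let b0 := PySem.List.pyGetD a v 0
    let bv := if p ≠ -1 then PySem.Int.bxor b0 (PySem.List.pyGetD Barr p 0) else b0
    (PySem.List.pyGetD G v []).foldl
      (pvFillAStep (fun u' v' B' => pvFillA G a f u' v' B') v p)
      (PySem.List.pySetD Barr v bv)

-- calc_dfs: state is (vals : array of sets, res); the loop body (recursive call, size-based
-- swap, zero |= tests, element-by-element merge, child clear) is the named helper pvCalcAStep
def pvCalcAStep (a : List Int)
    (recur : Int → Int → List (List Int) → Int → List (List Int) × Int) (v p : Int)
    (st : List (List Int) × Int × Bool) (u : Int) : List (List Int) × Int × Bool :=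
  if u = p then st else
  let c := recur u v st.1 st.2.1
  let sv := PySem.List.pyGetD c.1 v []
  let su := PySem.List.pyGetD c.1 u []
  let vals2 := if sv.length < su.length
    then PySem.List.pySetD (PySem.List.pySetD c.1 v su) u sv else c.1
  let sv2 := PySem.List.pyGetD vals2 v []
  let su2 := PySem.List.pyGetD vals2 u []
  let zero1 := st.2.2 || su2.any (fun x =>
    PySem.Set.contains sv2 (PySem.Int.bxor x (PySem.List.pyGetD a v 0)))
  let vals3 := PySem.List.pySetD vals2 v (su2.foldl PySem.Set.add sv2)
  (PySem.List.pySetD vals3 u [], c.2, zero1)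

def pvCalcA (G : List (List Int)) (a : List Int) (Barr : List Int) :
    Nat → Int → Int → List (List Int) → Int → List (List Int) × Int
  | 0, _, _, vals, res => (vals, res)
  | f+1, v, p, vals, res =>
    let vals1 := PySem.List.pySetD vals v
      (PySem.Set.add (PySem.List.pyGetD vals v []) (PySem.List.pyGetD Barr v 0))
    let st := (PySem.List.pyGetD G v []).foldl
      (pvCalcAStep a (fun u' v' vals' res' => pvCalcA G a Barr f u' v' vals' res') v p)
      (vals1, res, false)
    if st.2.2 then (PySem.List.pySetD st.1 v [], st.2.1 + 1) else (st.1, st.2.1)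

def min_operations_to_make_tree_good (n : Int) (a : List Int) (edges : List (Int × Int)) : Int :=
  let G := pvGraph n edges
  let Barr := pvFillA G a (n.toNat + 1) 0 (-1) (List.replicate n.toNat 0)
  (pvCalcA G a Barr (n.toNat + 1) 0 (-1) (List.replicate n.toNat []) 0).2

-- ===== PORT B =====
-- dfs(v, p, acc): one functional pass; returns (set of prefix-xors kept in the subtree, cuts);
-- the loop body over G[v] is the named helper pvDfsBStep
def pvDfsBStep (a : List Int) (recur : Int → Int → Int → List Int × Int) (v p b : Int)
    (st : List Int × Int × Bool) (u : Int) : List Int × Int × Bool :=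
  if u ≠ p then
    let c := recur u v b
    let zero1 := st.2.2 || c.1.any (fun x =>
      PySem.Set.contains st.1 (PySem.Int.bxor x (PySem.List.pyGetD a v 0)))
    (c.1.foldl PySem.Set.add st.1, st.2.1 + c.2, zero1)
  else st

def pvDfsB (G : List (List Int)) (a : List Int) : Nat → Int → Int → Int → List Int × Int
  | 0, _, _, _ => ([], 0)
  | f+1, v, p, acc =>
    let b := PySem.Int.bxor acc (PySem.List.pyGetD a v 0)
    let st := (PySem.List.pyGetD G v []).foldl
      (pvDfsBStep a (fun u' v' b' => pvDfsB G a f u' v' b') v p b)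
      (PySem.Set.ofList [b], (0 : Int), false)
    if st.2.2 then ([], st.2.1 + 1) else (st.1, st.2.1)

def min_operations_to_make_tree_good_alt (n : Int) (a : List Int) (edges : List (Int × Int)) : Int :=
  (pvDfsB (pvGraph n edges) a (n.toNat + 1) 0 (-1) 0).2

-- ===== PRECONDITION & SPEC =====
-- tree test used by Pre_: depth-first exploration from vertex 0 (Python vertex 1), skipping
-- the parent; fails (none) if a vertex is reached twice or is not a proper index (so deciding
-- Pre_ reads adjacency straight off the edge list and never materializes the n-sized graph)
def pvAdjE (n : Int) (edges : List (Int × Int)) (v : Int) : List Int :=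
  edges.flatMap (fun e =>
    (if (if e.1 - 1 < 0 then e.1 - 1 + n else e.1 - 1) = v then [e.2 - 1] else []) ++
    (if (if e.2 - 1 < 0 then e.2 - 1 + n else e.2 - 1) = v then [e.1 - 1] else []))

def pvBuildE (n : Int) (aLen : Nat) (edges : List (Int × Int)) :
    Nat → Int → Int → List Int → Option (List Int)
  | 0, _, _, _ => none
  | f+1, v, p, vis =>
    if v ∈ vis then none else
    if 0 ≤ v ∧ v < n ∧ v < (aLen : Int) then
      (pvAdjE n edges v).foldl
        (fun acc u => acc.bind (fun vis' =>
          if u ≠ p then pvBuildE n aLen edges f u v vis' else some vis'))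
        (some (vis ++ [v]))
    else none

-- Pre_ = the component of vertex 1 is a tree over properly-named vertices: the DFS from
-- vertex 1 revisits no vertex and every vertex it meets is a real index (0 ≤ v < n, v < len a);
-- edge endpoints stay inside Python's list-index range (else A raises IndexError building G).
-- Excluded inputs on which A still returns (revisits, negatively-wrapped vertex labels) are
-- corners where A's value hinges on leftover global set state and list-vs-dict index aliasing.
def Pre_min_operations_to_make_tree_good (n : Int) (a : List Int) (edges : List (Int × Int)) : Prop :=
  1 ≤ n ∧
  (∀ e ∈ edges, 1 - n ≤ e.1 ∧ e.1 ≤ n ∧ 1 - n ≤ e.2 ∧ e.2 ≤ n) ∧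
  (pvBuildE n a.length edges (n.toNat + 1) 0 (-1) []).isSome = true

instance (n : Int) (a : List Int) (edges : List (Int × Int)) :
    Decidable (Pre_min_operations_to_make_tree_good n a edges) := by
  unfold Pre_min_operations_to_make_tree_good; infer_instance

def pvWitness_min_operations_to_make_tree_good : Int × List Int × (List (Int × Int)) :=
  (3, [1, 2, 3], [(1, 2), (1, 3)])

def Spec_min_operations_to_make_tree_good (n : Int) (a : List Int) (edges : List (Int × Int)) (out : Int) : Prop := out = min_operations_to_make_tree_good_alt n a edges
instance (n : Int) (a : List Int) (edges : List (Int × Int)) (out : Int) : Decidable (Spec_min_operations_to_make_tree_good n a edges out) := by unfold Spec_min_operations_to_make_tree_good; infer_instance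

-- ===== CLAIM (what is proved, stated in full; the proofs are below) =====
def Claim_equal_min_operations_to_make_tree_good : Prop := ∀ (n : Int) (a : List Int) (edges : List (Int × Int)), Dom_min_operations_to_make_tree_good n a edges → Pre_min_operations_to_make_tree_good n a edges → Spec_min_operations_to_make_tree_good n a edges (min_operations_to_make_tree_good n a edges)


-- ===== LEMMAS AND PROOFS =====

-- tree test used by Pre_: depth-first exploration from vertex 0 (Python vertex 1), skipping the
-- parent, returning the list of visited vertices; none = a vertex was reached twice (not a tree)
def pvBuild (G : List (List Int)) (aLen : Nat) : Nat → Int → Int → List Int → Option (List Int)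
  | 0, _, _, _ => none
  | f+1, v, p, vis =>
    if v ∈ vis then none else
    if 0 ≤ v ∧ v < (G.length : Int) ∧ v < (aLen : Int) then
      (PySem.List.pyGetD G v []).foldl
        (fun acc u => acc.bind (fun vis' =>
          if u ≠ p then pvBuild G aLen f u v vis' else some vis'))
        (some (vis ++ [v]))
    else none


-- expected value of B[w] (one entry per vertex of the subtree of v), defined by the same
-- fuel recursion as the four functions above; proof-side device only
def pvBmap (G : List (List Int)) (a : List Int) : Nat → Int → Int → Int → List (Int × Int)
  | 0, _, _, _ => []
  | f+1, v, p, acc =>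
    (v, PySem.Int.bxor acc (PySem.List.pyGetD a v 0)) ::
      (PySem.List.pyGetD G v []).flatMap
        (fun u => if u ≠ p then pvBmap G a f u v (PySem.Int.bxor acc (PySem.List.pyGetD a v 0))
          else [])

lemma pvGetSet {α : Type} (xs : List α) (i j : Int) (x d : α)
    (h0 : 0 ≤ i) (h1 : i < (xs.length : Int)) (h2 : 0 ≤ j) :
    PySem.List.pyGetD (PySem.List.pySetD xs i x) j d
      = if j = i then x else PySem.List.pyGetD xs j d := by
  rw [PySem.List.pySetD_of_nonneg _ _ h0]
  rcases lt_or_ge j (xs.length : Int) with hj | hj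
  · by_cases hji : j = i
    · subst hji
      rw [if_pos rfl, PySem.List.pyGetD_eq_getElem _ d h2 (by simpa using hj),
        List.getElem_set (by simp; omega)]
      simp
    · rw [if_neg hji, PySem.List.pyGetD_eq_getElem _ d h2 (by simpa using hj),
        PySem.List.pyGetD_eq_getElem _ d h2 hj, List.getElem_set (by simp; omega)]
      rw [if_neg (by omega)]
  · have hji : j ≠ i := by omega
    rw [if_neg hji,
      PySem.List.pyGetD_of_none _ _ _ (by
        rw [PySem.List.pyGet?_eq_none_iff]
        simp [PySem.Raise.InRange]; omega),
      PySem.List.pyGetD_of_none _ _ _ (by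
        rw [PySem.List.pyGet?_eq_none_iff]
        simp [PySem.Raise.InRange]; omega)]

lemma pvGetDConst {α : Type} (xs : List α) (i : Int) (d : α) (h : ∀ y ∈ xs, y = d) :
    PySem.List.pyGetD xs i d = d := by
  cases hg : PySem.List.pyGet? xs i with
  | none => exact PySem.List.pyGetD_of_none _ _ _ hg
  | some y =>
    have := PySem.List.mem_of_pyGet?_eq_some (xs := xs) hg
    simp [PySem.List.pyGetD, hg, h y this]

lemma pvBxorCancel (x c : Int) : PySem.Int.bxor (PySem.Int.bxor x c) c = x := by
  unfold PySem.Int.bxor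
  by_cases hx : 0 ≤ x <;> by_cases hc : 0 ≤ c
  · rw [if_pos hx, if_pos hc, if_pos (Int.natCast_nonneg _), if_pos hc,
      Int.toNat_natCast, Nat.xor_xor_cancel_right, Int.toNat_of_nonneg hx]
  · rw [if_pos hx, if_neg hc,
      if_neg (show ¬ (0:ℤ) ≤ -↑(x.toNat ^^^ (-c-1).toNat) - 1 by omega),
      if_neg hc,
      show -(-(↑(x.toNat ^^^ (-c-1).toNat):ℤ) - 1) - 1 = ↑(x.toNat ^^^ (-c-1).toNat) by ring,
      Int.toNat_natCast, Nat.xor_xor_cancel_right, Int.toNat_of_nonneg hx]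
  · rw [if_neg hx, if_pos hc,
      if_neg (show ¬ (0:ℤ) ≤ -↑((-x-1).toNat ^^^ c.toNat) - 1 by omega),
      if_pos hc,
      show -(-(↑((-x-1).toNat ^^^ c.toNat):ℤ) - 1) - 1 = ↑((-x-1).toNat ^^^ c.toNat) by ring,
      Int.toNat_natCast, Nat.xor_xor_cancel_right, Int.toNat_of_nonneg (by omega : (0:ℤ) ≤ -x-1)]
    ring
  · rw [if_neg hx, if_neg hc, if_pos (Int.natCast_nonneg _), if_neg hc,
      Int.toNat_natCast, Nat.xor_xor_cancel_right, Int.toNat_of_nonneg (by omega : (0:ℤ) ≤ -x-1)]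
    ring

lemma pvMemFoldlAdd (l s : List Int) (y : Int) :
    y ∈ l.foldl PySem.Set.add s ↔ y ∈ s ∨ y ∈ l := by
  induction l generalizing s with
  | nil => simp
  | cons u t ih =>
    simp only [List.foldl_cons, ih, PySem.Set.mem_add, List.mem_cons]
    tauto

lemma pvNodupFoldlAdd (l s : List Int) (h : s.Nodup) : (l.foldl PySem.Set.add s).Nodup := by
  induction l generalizing s with
  | nil => simpa
  | cons u t ih => exact ih _ (PySem.Set.nodup_add s u h)

lemma pvAnyCongr {l1 l2 : List Int} {p1 p2 : Int → Bool}
    (h : ∀ x, x ∈ l1 ↔ x ∈ l2) (hp : ∀ x, p1 x = p2 x) : l1.any p1 = l2.any p2 := by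
  rw [Bool.eq_iff_iff]
  simp only [List.any_eq_true]
  constructor
  · rintro ⟨x, hx, hpx⟩; exact ⟨x, (h x).1 hx, (hp x) ▸ hpx⟩
  · rintro ⟨x, hx, hpx⟩; exact ⟨x, (h x).2 hx, (hp x).symm ▸ hpx⟩

lemma pvContainsCongr {s t : List Int} (h : ∀ x, x ∈ s ↔ x ∈ t) (y : Int) :
    PySem.Set.contains s y = PySem.Set.contains t y := by
  rw [Bool.eq_iff_iff, PySem.Set.contains_iff, PySem.Set.contains_iff]
  exact h y

lemma pvSwapAny (S T : List Int) (c : Int) :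
    S.any (fun x => PySem.Set.contains T (PySem.Int.bxor x c))
      = T.any (fun x => PySem.Set.contains S (PySem.Int.bxor x c)) := by
  rw [Bool.eq_iff_iff]
  simp only [List.any_eq_true, PySem.Set.contains_iff]
  constructor
  · rintro ⟨x, hx, hmem⟩
    exact ⟨_, hmem, by rw [pvBxorCancel]; exact hx⟩
  · rintro ⟨x, hx, hmem⟩
    exact ⟨_, hmem, by rw [pvBxorCancel]; exact hx⟩

lemma pvGraphFoldLen (l : List (Int × Int)) (G0 : List (List Int)) :
    (l.foldl (fun G e =>
      let G1 := PySem.List.pySetD G (e.1 - 1) (PySem.List.pyGetD G (e.1 - 1) [] ++ [e.2 - 1])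
      PySem.List.pySetD G1 (e.2 - 1) (PySem.List.pyGetD G1 (e.2 - 1) [] ++ [e.1 - 1])) G0).length
      = G0.length := by
  induction l generalizing G0 with
  | nil => rfl
  | cons e t ih =>
    simp only [List.foldl_cons]
    rw [ih]
    simp [PySem.List.length_pySetD]

lemma pvGraph_length (n : Int) (edges : List (Int × Int)) :
    (pvGraph n edges).length = n.toNat := by
  unfold pvGraph
  rw [pvGraphFoldLen]
  simp

lemma pvNormIdx (len : Nat) (i : Int) (h0 : -(len : Int) ≤ i) (h1 : i < (len : Int)) :
    PySem.List.pyIdx? len i = some ((if i < 0 then i + len else i).toNat) := by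
  unfold PySem.List.pyIdx?
  by_cases hi : 0 ≤ i
  · rw [if_pos hi, if_pos h1, if_neg (by omega)]
  · rw [if_neg hi, if_pos h0, if_pos (by omega)]
    congr 1
    omega

lemma pvGetNorm {α : Type} (xs : List α) (i : Int) (d : α)
    (h0 : -(xs.length : Int) ≤ i) (h1 : i < (xs.length : Int)) :
    PySem.List.pyGetD xs i d
      = PySem.List.pyGetD xs (if i < 0 then i + xs.length else i) d := by
  unfold PySem.List.pyGetD PySem.List.pyGet?
  rw [pvNormIdx _ _ h0 h1, pvNormIdx _ _ (by split <;> omega) (by split <;> omega)]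
  congr 2
  split <;> [skip; rfl]
  rw [if_neg (by omega)]

lemma pvSetNorm {α : Type} (xs : List α) (i : Int) (v : α)
    (h0 : -(xs.length : Int) ≤ i) (h1 : i < (xs.length : Int)) :
    PySem.List.pySetD xs i v
      = PySem.List.pySetD xs (if i < 0 then i + xs.length else i) v := by
  unfold PySem.List.pySetD PySem.List.pySet?
  rw [pvNormIdx _ _ h0 h1, pvNormIdx _ _ (by split <;> omega) (by split <;> omega)]
  congr 3
  split <;> [skip; rfl]
  rw [if_neg (by omega)]

lemma pvAdjE_eq (n : Int) (edges : List (Int × Int)) (hn : 1 ≤ n)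
    (hb : ∀ e ∈ edges, 1 - n ≤ e.1 ∧ e.1 ≤ n ∧ 1 - n ≤ e.2 ∧ e.2 ≤ n) :
    ∀ v, 0 ≤ v → v < n →
      PySem.List.pyGetD (pvGraph n edges) v [] = pvAdjE n edges v := by
  have key : ∀ (l : List (Int × Int)) (G0 : List (List Int)),
      G0.length = n.toNat →
      (∀ e ∈ l, 1 - n ≤ e.1 ∧ e.1 ≤ n ∧ 1 - n ≤ e.2 ∧ e.2 ≤ n) →
      ∀ v, 0 ≤ v → v < n →
      PySem.List.pyGetD (l.foldl (fun G e =>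
        let G1 := PySem.List.pySetD G (e.1 - 1) (PySem.List.pyGetD G (e.1 - 1) [] ++ [e.2 - 1])
        PySem.List.pySetD G1 (e.2 - 1) (PySem.List.pyGetD G1 (e.2 - 1) [] ++ [e.1 - 1])) G0) v []
        = PySem.List.pyGetD G0 v [] ++ l.flatMap (fun e =>
            (if (if e.1 - 1 < 0 then e.1 - 1 + n else e.1 - 1) = v then [e.2 - 1] else []) ++
            (if (if e.2 - 1 < 0 then e.2 - 1 + n else e.2 - 1) = v then [e.1 - 1] else [])) := by
    intro l
    induction l with
    | nil => intro G0 _ _ v _ _; simp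
    | cons e t iht =>
      intro G0 hlen hbl v hv0 hv1
      have hbe := hbl e List.mem_cons_self
      set i1 := e.1 - 1 with hi1
      set i2 := e.2 - 1 with hi2
      set m1 := (if i1 < 0 then i1 + n else i1) with hm1
      set m2 := (if i2 < 0 then i2 + n else i2) with hm2
      have hm10 : 0 ≤ m1 := by rw [hm1]; split <;> omega
      have hm11 : m1 < n := by rw [hm1]; split <;> omega
      have hm20 : 0 ≤ m2 := by rw [hm2]; split <;> omega
      have hm21 : m2 < n := by rw [hm2]; split <;> omega
      have hlenI : ((G0.length : Int)) = n := by rw [hlen]; omega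
      simp only [List.foldl_cons]
      have hstep :
          (let G1 := PySem.List.pySetD G0 i1 (PySem.List.pyGetD G0 i1 [] ++ [i2])
           PySem.List.pySetD G1 i2 (PySem.List.pyGetD G1 i2 [] ++ [i1]))
          = (let G1 := PySem.List.pySetD G0 m1 (PySem.List.pyGetD G0 m1 [] ++ [i2])
             PySem.List.pySetD G1 m2 (PySem.List.pyGetD G1 m2 [] ++ [i1])) := by
        dsimp only
        rw [pvSetNorm G0 i1 _ (by omega) (by omega),
          pvGetNorm G0 i1 _ (by omega) (by omega), hlenI, ← hm1,
          pvSetNorm _ i2 _ (by rw [PySem.List.length_pySetD]; omega)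
            (by rw [PySem.List.length_pySetD]; omega),
          pvGetNorm _ i2 _ (by rw [PySem.List.length_pySetD]; omega)
            (by rw [PySem.List.length_pySetD]; omega),
          PySem.List.length_pySetD, hlenI, ← hm2]
      rw [hstep]
      dsimp only
      rw [iht _ (by simp [PySem.List.length_pySetD, hlen])
        (fun e' he' => hbl e' (List.mem_cons_of_mem _ he')) v hv0 hv1]
      have hconsEq : ((if (if e.1 - 1 < 0 then e.1 - 1 + n else e.1 - 1) = v
            then [e.2 - 1] else []) ++
          (if (if e.2 - 1 < 0 then e.2 - 1 + n else e.2 - 1) = v then [e.1 - 1] else []))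
          = ((if m1 = v then [i2] else []) ++ (if m2 = v then [i1] else [])) := by
        rw [hm1, hm2, hi1, hi2]
      simp only [List.flatMap_cons]
      rw [hconsEq, ← List.append_assoc]
      congr 1
      have hG1len : ((PySem.List.pySetD G0 m1 (PySem.List.pyGetD G0 m1 [] ++ [i2])).length : Int)
          = n := by rw [PySem.List.length_pySetD]; exact hlenI
      rw [pvGetSet _ m2 v _ _ hm20 (by rw [PySem.List.length_pySetD]; omega) hv0,
        pvGetSet _ m1 v _ _ hm10 (by omega) hv0,
        pvGetSet _ m1 m2 _ _ hm10 (by omega) hm20]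
      by_cases h1 : m1 = v <;> by_cases h2 : m2 = v
      · simp [h1, h2]
      · simp [h1, h2, Ne.symm h2]
      · simp [h1, h2, Ne.symm h1]
      · simp [h1, h2, Ne.symm h1, Ne.symm h2]
  intro v hv0 hv1
  unfold pvGraph pvAdjE
  rw [key edges (List.replicate n.toNat []) (by simp) hb v hv0 hv1,
    pvGetDConst _ _ _ (fun y hy => List.eq_of_mem_replicate hy)]
  simp

lemma pvBuildE_eq (n : Int) (aLen : Nat) (edges : List (Int × Int)) (hn : 1 ≤ n)
    (hb : ∀ e ∈ edges, 1 - n ≤ e.1 ∧ e.1 ≤ n ∧ 1 - n ≤ e.2 ∧ e.2 ≤ n) :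
    ∀ fuel v p vis, pvBuildE n aLen edges fuel v p vis
      = pvBuild (pvGraph n edges) aLen fuel v p vis := by
  intro fuel
  induction fuel with
  | zero => intro v p vis; rfl
  | succ f ihf =>
    intro v p vis
    rw [pvBuildE, pvBuild]
    have hlenI : ((pvGraph n edges).length : Int) = n := by rw [pvGraph_length]; omega
    by_cases hvv : v ∈ vis
    · rw [if_pos hvv, if_pos hvv]
    rw [if_neg hvv, if_neg hvv]
    by_cases hrng : 0 ≤ v ∧ v < n ∧ v < (aLen : Int)
    · rw [if_pos hrng, if_pos ⟨hrng.1, by omega, hrng.2.2⟩,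
        ← pvAdjE_eq n edges hn hb v hrng.1 hrng.2.1]
      congr 1
      funext acc u
      congr 1
      funext vis'
      by_cases hup : u ≠ p
      · rw [if_pos hup, if_pos hup, ihf]
      · rw [if_neg hup, if_neg hup]
    · rw [if_neg hrng, if_neg (fun h => hrng ⟨h.1, by omega, h.2.2⟩)]

def BigP (G : List (List Int)) (a : List Int) (f : Nat) : Prop :=
  ∀ v p vis vis', pvBuild G a.length f v p vis = some vis' →
    ∃ pre, vis' = vis ++ pre ∧ v ∈ pre ∧ (∀ w ∈ pre, w ∉ vis) ∧ pre.Nodup ∧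
      (∀ w ∈ pre, 0 ≤ w ∧ w < (G.length : Int)) ∧
      ∀ acc : Int,
        (∀ wb ∈ pvBmap G a f v p acc, wb.1 ∈ pre) ∧
        (∀ Barr, Barr.length = G.length →
          ((p = -1 ∧ acc = 0) ∨ (p ≠ -1 ∧ PySem.List.pyGetD Barr p 0 = acc)) →
          (pvFillA G a f v p Barr).length = G.length ∧
          (∀ w, 0 ≤ w → w ∉ pre →
            PySem.List.pyGetD (pvFillA G a f v p Barr) w 0 = PySem.List.pyGetD Barr w 0) ∧
          (∀ wb ∈ pvBmap G a f v p acc,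
            PySem.List.pyGetD (pvFillA G a f v p Barr) wb.1 0 = wb.2)) ∧
        (∀ Barr vals res,
          vals.length = G.length →
          (∀ wb ∈ pvBmap G a f v p acc, PySem.List.pyGetD Barr wb.1 0 = wb.2) →
          (∀ w ∈ pre, PySem.List.pyGetD vals w ([] : List Int) = []) →
          (pvCalcA G a Barr f v p vals res).2 = res + (pvDfsB G a f v p acc).2 ∧
          (pvCalcA G a Barr f v p vals res).1.length = G.length ∧
          (∀ x, x ∈ PySem.List.pyGetD (pvCalcA G a Barr f v p vals res).1 v ([] : List Int)
            ↔ x ∈ (pvDfsB G a f v p acc).1) ∧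
          (PySem.List.pyGetD (pvCalcA G a Barr f v p vals res).1 v ([] : List Int)).Nodup ∧
          (pvDfsB G a f v p acc).1.Nodup ∧
          (∀ w ∈ pre, w ≠ v →
            PySem.List.pyGetD (pvCalcA G a Barr f v p vals res).1 w ([] : List Int) = []) ∧
          (∀ w, 0 ≤ w → w ∉ pre →
            PySem.List.pyGetD (pvCalcA G a Barr f v p vals res).1 w ([] : List Int)
              = PySem.List.pyGetD vals w ([] : List Int)))

lemma pvBuildFoldNone (G : List (List Int)) (aLen : Nat) (f : Nat) (v p : Int) (us : List Int) :
    us.foldl (fun acc u => acc.bind (fun vis' =>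
      if u ≠ p then pvBuild G aLen f u v vis' else some vis')) none = none := by
  induction us with
  | nil => rfl
  | cons u t ih => simpa using ih


-- evaluation of the three loop bodies on a skipped / processed child
lemma pvFillAStep_skip (R : Int → Int → List Int → List Int) (v p : Int) (B : List Int)
    (u : Int) (hup : u = p) : pvFillAStep R v p B u = B := by
  simp [pvFillAStep, hup]

lemma pvFillAStep_go (R : Int → Int → List Int → List Int) (v p : Int) (B : List Int)
    (u : Int) (hup : u ≠ p) : pvFillAStep R v p B u = R u v B := by
  simp [pvFillAStep, hup]

lemma pvCalcAStep_skip (a : List Int)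
    (R : Int → Int → List (List Int) → Int → List (List Int) × Int) (v p : Int)
    (st : List (List Int) × Int × Bool) (u : Int) (hup : u = p) :
    pvCalcAStep a R v p st u = st := by
  simp [pvCalcAStep, hup]

lemma pvDfsBStep_skip (a : List Int) (R : Int → Int → Int → List Int × Int) (v p b : Int)
    (st : List Int × Int × Bool) (u : Int) (hup : u = p) :
    pvDfsBStep a R v p b st u = st := by
  simp [pvDfsBStep, hup]

-- the size-based swap of vals[v] and vals[u], as a function of the state
def pvSwap (c1 : List (List Int)) (v u : Int) : List (List Int) :=
  if (PySem.List.pyGetD c1 v []).length < (PySem.List.pyGetD c1 u []).length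
  then PySem.List.pySetD (PySem.List.pySetD c1 v (PySem.List.pyGetD c1 u []))
        u (PySem.List.pyGetD c1 v [])
  else c1

lemma pvCalcAStep_go (a : List Int)
    (R : Int → Int → List (List Int) → Int → List (List Int) × Int)
    (v p u : Int) (vals : List (List Int)) (res : Int) (zero : Bool) (hup : u ≠ p) :
    pvCalcAStep a R v p (vals, res, zero) u =
      (PySem.List.pySetD (PySem.List.pySetD (pvSwap (R u v vals res).1 v u) v
          ((PySem.List.pyGetD (pvSwap (R u v vals res).1 v u) u []).foldl PySem.Set.add
           (PySem.List.pyGetD (pvSwap (R u v vals res).1 v u) v []))) u [],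
       (R u v vals res).2,
       zero || (PySem.List.pyGetD (pvSwap (R u v vals res).1 v u) u []).any (fun x =>
         PySem.Set.contains (PySem.List.pyGetD (pvSwap (R u v vals res).1 v u) v [])
           (PySem.Int.bxor x (PySem.List.pyGetD a v 0)))) := by
  simp only [pvCalcAStep, pvSwap]
  rw [if_neg hup]

lemma pvDfsBStep_go (a : List Int) (R : Int → Int → Int → List Int × Int) (v p b : Int)
    (s : List Int) (cuts : Int) (zero : Bool) (u : Int) (hup : u ≠ p) :
    pvDfsBStep a R v p b (s, cuts, zero) u =
      ((R u v b).1.foldl PySem.Set.add s, cuts + (R u v b).2,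
       zero || (R u v b).1.any (fun x =>
         PySem.Set.contains s (PySem.Int.bxor x (PySem.List.pyGetD a v 0)))) := by
  simp only [pvDfsBStep]
  rw [if_pos hup]

lemma BigQ (G : List (List Int)) (a : List Int) (f : Nat) (HP : BigP G a f)
    (v p : Int) (hv0 : 0 ≤ v) (hv1 : v < (G.length : Int)) :
    ∀ (us vis vis_end : List Int),
      (us.foldl (fun acc u => acc.bind (fun vis' =>
        if u ≠ p then pvBuild G a.length f u v vis' else some vis')) (some vis)) = some vis_end →
      v ∈ vis →
      ∃ preR, vis_end = vis ++ preR ∧ (∀ w ∈ preR, w ∉ vis) ∧ preR.Nodup ∧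
        (∀ w ∈ preR, 0 ≤ w ∧ w < (G.length : Int)) ∧
        ∀ b : Int,
        (∀ wb ∈ us.flatMap (fun u => if u ≠ p then pvBmap G a f u v b else []), wb.1 ∈ preR) ∧
        (∀ Barr, Barr.length = G.length → PySem.List.pyGetD Barr v 0 = b →
          (let Ff := us.foldl (pvFillAStep (fun u' v' B' => pvFillA G a f u' v' B') v p) Barr
          Ff.length = G.length ∧
          (∀ w, 0 ≤ w → w ∉ preR → PySem.List.pyGetD Ff w 0 = PySem.List.pyGetD Barr w 0) ∧
          (∀ wb ∈ us.flatMap (fun u => if u ≠ p then pvBmap G a f u v b else []),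
            PySem.List.pyGetD Ff wb.1 0 = wb.2))) ∧
        (∀ Barr vals res zero s cuts,
          vals.length = G.length →
          (∀ wb ∈ us.flatMap (fun u => if u ≠ p then pvBmap G a f u v b else []),
            PySem.List.pyGetD Barr wb.1 0 = wb.2) →
          (∀ w ∈ preR, PySem.List.pyGetD vals w ([] : List Int) = []) →
          (∀ x, x ∈ PySem.List.pyGetD vals v ([] : List Int) ↔ x ∈ s) →
          (PySem.List.pyGetD vals v ([] : List Int)).Nodup → s.Nodup →
          (let Af := us.foldl (pvCalcAStep a
              (fun u' v' vals' res' => pvCalcA G a Barr f u' v' vals' res') v p) (vals, res, zero)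
          let Bf := us.foldl (pvDfsBStep a
              (fun u' v' b' => pvDfsB G a f u' v' b') v p b) (s, cuts, zero)
          Af.2.1 + cuts = Bf.2.1 + res ∧ Af.2.2 = Bf.2.2 ∧ Af.1.length = G.length ∧
          (∀ x, x ∈ PySem.List.pyGetD Af.1 v ([] : List Int) ↔ x ∈ Bf.1) ∧
          (PySem.List.pyGetD Af.1 v ([] : List Int)).Nodup ∧ Bf.1.Nodup ∧
          (∀ w ∈ preR, PySem.List.pyGetD Af.1 w ([] : List Int) = []) ∧
          (∀ w, 0 ≤ w → w ∉ preR → w ≠ v →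
            PySem.List.pyGetD Af.1 w ([] : List Int)
              = PySem.List.pyGetD vals w ([] : List Int)))) := by
  intro us
  induction us with
  | nil =>
    intro vis vis_end hfold hvvis
    simp only [List.foldl_nil] at hfold
    obtain rfl := Option.some.inj hfold
    refine ⟨[], by simp, by simp, List.nodup_nil, by simp, ?_⟩
    intro b
    refine ⟨by simp, ?_, ?_⟩
    · intro Barr hBl hBv
      dsimp only [List.foldl_nil]
      exact ⟨hBl, fun w _ _ => rfl, fun wb hwb => absurd hwb (by simp)⟩
    · intro Barr vals res zero s cuts h1 h2 h3 h4 h5 h6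
      dsimp only [List.foldl_nil]
      exact ⟨by omega, rfl, h1, h4, h5, h6, fun w hw => absurd hw (by simp),
        fun w _ _ _ => rfl⟩
  | cons u rest ih =>
    intro vis vis_end hfold hvvis
    simp only [List.foldl_cons] at hfold
    rw [show ((some vis).bind (fun vis' =>
        if u ≠ p then pvBuild G a.length f u v vis' else some vis'))
      = (if u ≠ p then pvBuild G a.length f u v vis else some vis) from rfl] at hfold
    by_cases hup : u = p
    · -- skipped child (u == p)
      rw [if_neg (by simp [hup])] at hfold
      obtain ⟨preR, hveq, hdisj, hnd, hrange, hparts⟩ := ih vis vis_end hfold hvvis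
      refine ⟨preR, hveq, hdisj, hnd, hrange, ?_⟩
      intro b
      obtain ⟨hkeys, hfill, hcalc⟩ := hparts b
      refine ⟨?_, ?_, ?_⟩
      · intro wb hwb
        rw [List.flatMap_cons, if_neg (by simp [hup]), List.nil_append] at hwb
        exact hkeys wb hwb
      · intro Barr hBl hBv
        obtain ⟨f1, f2, f3⟩ := hfill Barr hBl hBv
        rw [List.foldl_cons, pvFillAStep_skip _ _ _ _ _ hup]
        refine ⟨f1, f2, ?_⟩
        intro wb hwb
        rw [List.flatMap_cons, if_neg (by simp [hup]), List.nil_append] at hwb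
        exact f3 wb hwb
      · intro Barr vals res zero s cuts h1 h2 h3 h4 h5 h6
        rw [List.foldl_cons, List.foldl_cons, pvCalcAStep_skip _ _ _ _ _ _ hup,
          pvDfsBStep_skip _ _ _ _ _ _ _ hup]
        exact hcalc Barr vals res zero s cuts h1
          (fun wb hwb => h2 wb (by
            rw [List.flatMap_cons, if_neg (by simp [hup]), List.nil_append]; exact hwb))
          h3 h4 h5 h6
    · -- real child (u != p)
      rw [if_pos hup] at hfold
      cases hb1 : pvBuild G a.length f u v vis with
      | none =>
        rw [hb1, pvBuildFoldNone] at hfold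
        cases hfold
      | some vis1 =>
        rw [hb1] at hfold
        obtain ⟨pre_u, hveq1, humem, hdisj1, hnd1, hrange1, hparts1⟩ :=
          HP u v vis vis1 hb1
        obtain ⟨preRest, hveq2, hdisj2, hnd2, hrange2, hparts2⟩ :=
          ih vis1 vis_end hfold (by rw [hveq1]; exact List.mem_append_left _ hvvis)
        have hurange := hrange1 u humem
        have hvnotu : v ∉ pre_u := fun h => hdisj1 v h hvvis
        have huv : u ≠ v := fun h => hdisj1 u humem (h ▸ hvvis)
        have hdisjUR : ∀ w ∈ pre_u, w ∉ preRest := by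
          intro w hw hw2
          exact hdisj2 w hw2 (by rw [hveq1]; exact List.mem_append_right _ hw)
        have hvnotRest : v ∉ preRest := by
          intro h
          exact hdisj2 v h (by rw [hveq1]; exact List.mem_append_left _ hvvis)
        have hunotRest : u ∉ preRest := hdisjUR u humem
        refine ⟨pre_u ++ preRest, ?_, ?_, ?_, ?_, ?_⟩
        · rw [hveq2, hveq1, List.append_assoc]
        · intro w hw
          rcases List.mem_append.1 hw with hw | hw
          · exact hdisj1 w hw
          · intro hwvis
            exact hdisj2 w hw (by rw [hveq1]; exact List.mem_append_left _ hwvis)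
        · exact List.nodup_append.2 ⟨hnd1, hnd2,
            fun a ha b hb heq => hdisjUR a ha (by rw [heq]; exact hb)⟩
        · intro w hw
          rcases List.mem_append.1 hw with hw | hw
          · exact hrange1 w hw
          · exact hrange2 w hw
        · intro b
          obtain ⟨hkeysu, hfillu, hcalcu⟩ := hparts1 b
          obtain ⟨hkeys2, hfill2, hcalc2⟩ := hparts2 b
          refine ⟨?_, ?_, ?_⟩
          · -- keys
            intro wb hwb
            rw [List.flatMap_cons, if_pos hup] at hwb
            rcases List.mem_append.1 hwb with hwb | hwb
            · exact List.mem_append_left _ (hkeysu wb hwb)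
            · exact List.mem_append_right _ (hkeys2 wb hwb)
          · -- fill
            intro Barr hBl hBv
            rw [List.foldl_cons, pvFillAStep_go _ _ _ _ _ hup]
            obtain ⟨f1u, f2u, f3u⟩ := hfillu Barr hBl (Or.inr ⟨by omega, hBv⟩)
            obtain ⟨f12, f22, f32⟩ := hfill2 (pvFillA G a f u v Barr) f1u
              (by rw [f2u v hv0 hvnotu]; exact hBv)
            refine ⟨f12, ?_, ?_⟩
            · intro w hw0 hwnot
              rw [f22 w hw0 (fun h => hwnot (List.mem_append_right _ h)),
                f2u w hw0 (fun h => hwnot (List.mem_append_left _ h))]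
            · intro wb hwb
              rw [List.flatMap_cons, if_pos hup] at hwb
              rcases List.mem_append.1 hwb with hwb | hwb
              · have hkey := hkeysu wb hwb
                rw [f22 wb.1 (hrange1 wb.1 hkey).1 (hdisjUR wb.1 hkey)]
                exact f3u wb hwb
              · exact f32 wb hwb
          · -- calc
            intro Barr vals res zero s cuts h1 h2 h3 h4 h5 h6
            rw [List.foldl_cons, List.foldl_cons,
              pvCalcAStep_go _ _ _ _ _ _ _ _ hup, pvDfsBStep_go _ _ _ _ _ _ _ _ _ hup]
            obtain ⟨hc1, hcl, hciff, hcndA, hcndB, hcclear, hcframe⟩ :=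
              hcalcu Barr vals res h1
                (fun wb hwb => h2 wb (by
                  rw [List.flatMap_cons, if_pos hup]; exact List.mem_append_left _ hwb))
                (fun w hw => h3 w (List.mem_append_left _ hw))
            set c := pvCalcA G a Barr f u v vals res with hc
            set d := pvDfsB G a f u v b with hd
            have hSVeq : PySem.List.pyGetD c.1 v [] = PySem.List.pyGetD vals v [] :=
              hcframe v hv0 hvnotu
            have hV2len : (pvSwap c.1 v u).length = G.length := by
              unfold pvSwap
              split
              · simp [PySem.List.length_pySetD, hcl]
              · exact hcl
            have hswcase :
                (PySem.List.pyGetD (pvSwap c.1 v u) v [] = PySem.List.pyGetD c.1 u []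
                  ∧ PySem.List.pyGetD (pvSwap c.1 v u) u [] = PySem.List.pyGetD c.1 v [])
                ∨ (PySem.List.pyGetD (pvSwap c.1 v u) v [] = PySem.List.pyGetD c.1 v []
                  ∧ PySem.List.pyGetD (pvSwap c.1 v u) u [] = PySem.List.pyGetD c.1 u []) := by
              unfold pvSwap
              split
              · left
                constructor
                · rw [pvGetSet _ u v _ _ hurange.1
                      (by rw [PySem.List.length_pySetD, hcl]; exact hurange.2) hv0,
                    if_neg (fun h => huv h.symm),
                    pvGetSet _ v v _ _ hv0 (by rw [hcl]; exact hv1) hv0, if_pos rfl]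
                · rw [pvGetSet _ u u _ _ hurange.1
                      (by rw [PySem.List.length_pySetD, hcl]; exact hurange.2) hurange.1,
                    if_pos rfl]
              · right; exact ⟨rfl, rfl⟩
            have hV2frame : ∀ w, 0 ≤ w → w ≠ v → w ≠ u →
                PySem.List.pyGetD (pvSwap c.1 v u) w [] = PySem.List.pyGetD c.1 w [] := by
              intro w hw0 hwv hwu
              unfold pvSwap
              split
              · rw [pvGetSet _ u w _ _ hurange.1
                    (by rw [PySem.List.length_pySetD, hcl]; exact hurange.2) hw0,
                  if_neg hwu,
                  pvGetSet _ v w _ _ hv0 (by rw [hcl]; exact hv1) hw0, if_neg hwv]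
              · rfl
            have hSVnodup : (PySem.List.pyGetD c.1 v []).Nodup := by rw [hSVeq]; exact h5
            have hSViff : ∀ x, x ∈ PySem.List.pyGetD c.1 v [] ↔ x ∈ s := by
              intro x; rw [hSVeq]; exact h4 x
            -- the zero flags computed by A and B agree
            have hZ : (zero || (PySem.List.pyGetD (pvSwap c.1 v u) u []).any (fun x =>
                PySem.Set.contains (PySem.List.pyGetD (pvSwap c.1 v u) v [])
                  (PySem.Int.bxor x (PySem.List.pyGetD a v 0))))
                = (zero || d.1.any (fun x =>
                    PySem.Set.contains s (PySem.Int.bxor x (PySem.List.pyGetD a v 0)))) := by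
              rcases hswcase with ⟨e1, e2⟩ | ⟨e1, e2⟩
              · rw [e1, e2, pvSwapAny]
                congr 1
                exact pvAnyCongr hciff (fun x => pvContainsCongr hSViff _)
              · rw [e1, e2]
                congr 1
                exact pvAnyCongr hciff (fun x => pvContainsCongr hSViff _)
            have hNViff : ∀ x,
                x ∈ (PySem.List.pyGetD (pvSwap c.1 v u) u []).foldl PySem.Set.add
                      (PySem.List.pyGetD (pvSwap c.1 v u) v [])
                ↔ x ∈ d.1.foldl PySem.Set.add s := by
              intro x
              rw [pvMemFoldlAdd, pvMemFoldlAdd]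
              have h1 := hSViff x
              have h2 := hciff x
              rcases hswcase with ⟨e1, e2⟩ | ⟨e1, e2⟩ <;> rw [e1, e2] <;> tauto
            have hNVnodup :
                ((PySem.List.pyGetD (pvSwap c.1 v u) u []).foldl PySem.Set.add
                  (PySem.List.pyGetD (pvSwap c.1 v u) v [])).Nodup := by
              rcases hswcase with ⟨e1, _⟩ | ⟨e1, _⟩ <;> rw [e1]
              · exact pvNodupFoldlAdd _ _ hcndA
              · exact pvNodupFoldlAdd _ _ hSVnodup
            set NV := (PySem.List.pyGetD (pvSwap c.1 v u) u []).foldl PySem.Set.add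
              (PySem.List.pyGetD (pvSwap c.1 v u) v []) with hNV
            set VALS4 := PySem.List.pySetD (PySem.List.pySetD (pvSwap c.1 v u) v NV) u []
              with hVALS4
            have hV3len : (PySem.List.pySetD (pvSwap c.1 v u) v NV).length = G.length := by
              rw [PySem.List.length_pySetD]; exact hV2len
            have hV4len : VALS4.length = G.length := by
              rw [hVALS4, PySem.List.length_pySetD]; exact hV3len
            have hV4at : ∀ w, 0 ≤ w → w ≠ u → w ≠ v →
                PySem.List.pyGetD VALS4 w [] = PySem.List.pyGetD c.1 w [] := by
              intro w hw0 hwu hwv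
              rw [hVALS4, pvGetSet _ u w _ _ hurange.1
                  (by rw [hV3len]; exact hurange.2) hw0, if_neg hwu,
                pvGetSet _ v w _ _ hv0 (by rw [hV2len]; exact hv1) hw0, if_neg hwv]
              exact hV2frame w hw0 hwv hwu
            have hV4u : PySem.List.pyGetD VALS4 u [] = [] := by
              rw [hVALS4, pvGetSet _ u u _ _ hurange.1
                  (by rw [hV3len]; exact hurange.2) hurange.1, if_pos rfl]
            have hV4v : PySem.List.pyGetD VALS4 v [] = NV := by
              rw [hVALS4, pvGetSet _ u v _ _ hurange.1
                  (by rw [hV3len]; exact hurange.2) hv0, if_neg (fun h => huv h.symm),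
                pvGetSet _ v v _ _ hv0 (by rw [hV2len]; exact hv1) hv0, if_pos rfl]
            obtain ⟨g1, g2, g3, g4, g5, g6, g7, g8⟩ :=
              hcalc2 Barr VALS4 c.2
                (zero || (PySem.List.pyGetD (pvSwap c.1 v u) u []).any (fun x =>
                  PySem.Set.contains (PySem.List.pyGetD (pvSwap c.1 v u) v [])
                    (PySem.Int.bxor x (PySem.List.pyGetD a v 0))))
                (d.1.foldl PySem.Set.add s) (cuts + d.2)
                hV4len
                (fun wb hwb => h2 wb (by
                  rw [List.flatMap_cons, if_pos hup]; exact List.mem_append_right _ hwb))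
                (by
                  intro w hw
                  have hw0 := (hrange2 w hw).1
                  have hwu : w ≠ u := fun h => hunotRest (h ▸ hw)
                  have hwv : w ≠ v := fun h => hvnotRest (h ▸ hw)
                  rw [hV4at w hw0 hwu hwv, hcframe w hw0 (fun h => hdisjUR w h hw)]
                  exact h3 w (List.mem_append_right _ hw))
                (by rw [hV4v]; exact hNViff)
                (by rw [hV4v]; exact hNVnodup)
                (pvNodupFoldlAdd _ _ h6)
            rw [hZ] at g1 g2 g3 g4 g5 g6 g7 g8 ⊢
            refine ⟨by omega, g2, g3, g4, g5, g6, ?_, ?_⟩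
            · intro w hw
              rcases List.mem_append.1 hw with hw | hw
              · have hw0 := (hrange1 w hw).1
                have hwRest : w ∉ preRest := hdisjUR w hw
                have hwv : w ≠ v := fun h => hvnotu (h ▸ hw)
                rw [g8 w hw0 hwRest hwv]
                by_cases hwu : w = u
                · subst hwu; exact hV4u
                · rw [hV4at w hw0 hwu hwv]
                  exact hcclear w hw hwu
              · exact g7 w hw
            · intro w hw0 hwnot hwv
              have hwu : w ≠ u := fun h => hwnot (List.mem_append_left _ (h ▸ humem))
              rw [g8 w hw0 (fun h => hwnot (List.mem_append_right _ h)) hwv,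
                hV4at w hw0 hwu hwv, hcframe w hw0 (fun h => hwnot (List.mem_append_left _ h))]

lemma pvBigMain (G : List (List Int)) (a : List Int) : ∀ f, BigP G a f := by
  intro f
  induction f with
  | zero =>
    intro v p vis vis' hbuild
    simp [pvBuild] at hbuild
  | succ f ih =>
    intro v p vis vis' hbuild
    rw [pvBuild] at hbuild
    by_cases hvv : v ∈ vis
    · rw [if_pos hvv] at hbuild; cases hbuild
    · rw [if_neg hvv] at hbuild
      by_cases hrng : 0 ≤ v ∧ v < (G.length : Int) ∧ v < (a.length : Int)
      case neg => rw [if_neg hrng] at hbuild; cases hbuild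
      rw [if_pos hrng] at hbuild
      obtain ⟨hv0, hv1, -⟩ := hrng
      obtain ⟨preR, hveq, hdisj, hnd, hrange, hparts⟩ :=
        BigQ G a f ih v p hv0 hv1 (PySem.List.pyGetD G v []) (vis ++ [v]) vis' hbuild
          (by simp)
      have hvpre : v ∉ preR := fun hvp => hdisj v hvp (by simp)
      refine ⟨v :: preR, by rw [hveq]; simp, by simp, ?_, ?_, ?_, ?_⟩
      · intro w hw
        rcases List.mem_cons.1 hw with rfl | hw
        · exact hvv
        · intro hwvis; exact hdisj w hw (List.mem_append_left _ hwvis)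
      · exact List.nodup_cons.2 ⟨hvpre, hnd⟩
      · intro w hw
        rcases List.mem_cons.1 hw with rfl | hw
        · exact ⟨hv0, hv1⟩
        · exact hrange w hw
      · intro acc
        set b := PySem.Int.bxor acc (PySem.List.pyGetD a v 0) with hbdef
        obtain ⟨hkeys, hfill, hcalc⟩ := hparts b
        refine ⟨?_, ?_, ?_⟩
        · -- bmap keys lie in v :: preR
          intro wb hwb
          rw [pvBmap, ← hbdef] at hwb
          rcases List.mem_cons.1 hwb with rfl | hwb
          · exact List.mem_cons_self
          · exact List.mem_cons_of_mem _ (hkeys wb hwb)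
        · -- fill part
          intro Barr hBl hacc
          have hbv : (if p ≠ -1 then
              PySem.Int.bxor (PySem.List.pyGetD a v 0) (PySem.List.pyGetD Barr p 0)
              else PySem.List.pyGetD a v 0) = b := by
            rcases hacc with ⟨hp, ha⟩ | ⟨hp, ha⟩
            · rw [if_neg (by simp [hp]), hbdef, ha, PySem.Int.bxor_comm, PySem.Int.bxor_zero]
            · rw [if_pos hp, ha, hbdef, PySem.Int.bxor_comm]
          rw [pvFillA]
          rw [hbv]
          have hB1l : (PySem.List.pySetD Barr v b).length = G.length := by
            simp [PySem.List.length_pySetD, hBl]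
          have hB1v : PySem.List.pyGetD (PySem.List.pySetD Barr v b) v 0 = b := by
            rw [pvGetSet Barr v v b 0 hv0 (by omega) hv0, if_pos rfl]
          obtain ⟨hfl1, hffr1, hfbm1⟩ := hfill (PySem.List.pySetD Barr v b) hB1l hB1v
          refine ⟨hfl1, ?_, ?_⟩
          · intro w hw0 hwpre
            have hwv : w ≠ v := fun h => hwpre (h ▸ List.mem_cons_self)
            have hwpreR : w ∉ preR := fun h => hwpre (List.mem_cons_of_mem _ h)
            rw [hffr1 w hw0 hwpreR, pvGetSet Barr v w b 0 hv0 (by omega) hw0, if_neg hwv]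
          · intro wb hwb
            rw [pvBmap, ← hbdef] at hwb
            rcases List.mem_cons.1 hwb with rfl | hwb
            · rw [hffr1 v hv0 hvpre, hB1v]
            · exact hfbm1 wb hwb
        · -- calc part
          intro Barr vals res hvl hb hz
          have hbv : PySem.List.pyGetD Barr v 0 = b := by
            have := hb (v, b) (by rw [pvBmap, ← hbdef]; exact List.mem_cons_self)
            simpa using this
          rw [pvCalcA, pvDfsB]
          rw [← hbdef]
          have hzv : PySem.List.pyGetD vals v ([] : List Int) = [] :=
            hz v List.mem_cons_self
          have hvals1 : PySem.List.pySetD vals v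
              (PySem.Set.add (PySem.List.pyGetD vals v []) (PySem.List.pyGetD Barr v 0))
              = PySem.List.pySetD vals v [b] := by
            rw [hzv, hbv]
            rfl
          have hofb : PySem.Set.ofList [b] = [b] :=
            PySem.Set.ofList_eq_self_of_nodup _ (by simp)
          rw [hvals1, hofb]
          have hv1l : (PySem.List.pySetD vals v [b]).length = G.length := by
            simp [PySem.List.length_pySetD, hvl]
          have hv1get : PySem.List.pyGetD (PySem.List.pySetD vals v [b]) v ([] : List Int)
              = [b] := by
            rw [pvGetSet vals v v [b] [] hv0 (by omega) hv0, if_pos rfl]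
          obtain ⟨g1, g2, g3, g4, g5, g6, g7, g8⟩ :=
            hcalc Barr (PySem.List.pySetD vals v [b]) res false [b] 0 hv1l
              (fun wb hwb => hb wb (by rw [pvBmap, ← hbdef]; exact List.mem_cons_of_mem _ hwb))
              (by
                intro w hw
                have hwv : w ≠ v := fun h => hvpre (h ▸ hw)
                rw [pvGetSet vals v w [b] [] hv0 (by omega) (hrange w hw).1, if_neg hwv]
                exact hz w (List.mem_cons_of_mem _ hw))
              (by rw [hv1get]; intro x; rfl)
              (by rw [hv1get]; simp)
              (by simp)
          rw [g2]
          by_cases hflag :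
            ((PySem.List.pyGetD G v []).foldl (pvDfsBStep a
              (fun u' v' b' => pvDfsB G a f u' v' b') v p b) ([b], (0 : Int), false)).2.2 = true
          · rw [if_pos hflag, if_pos hflag]
            have hAfl : ((PySem.List.pyGetD G v []).foldl (pvCalcAStep a
                (fun u' v' vals' res' => pvCalcA G a Barr f u' v' vals' res') v p)
                (PySem.List.pySetD vals v [b], res, false)).1.length = G.length := g3
            refine ⟨by dsimp only; omega, by simp [PySem.List.length_pySetD, g3], ?_, ?_, by simp, ?_, ?_⟩
            · intro x
              rw [pvGetSet _ v v [] [] hv0 (by rw [hAfl]; omega) hv0, if_pos rfl]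
            · rw [pvGetSet _ v v [] [] hv0 (by rw [hAfl]; omega) hv0, if_pos rfl]
              simp
            · intro w hw hwv
              have hw' : w ∈ preR := by
                rcases List.mem_cons.1 hw with rfl | h; · exact absurd rfl hwv
                · exact h
              rw [pvGetSet _ v w [] [] hv0 (by rw [hAfl]; omega) (hrange w hw').1, if_neg
                (fun h => hvpre (by rw [← h]; exact hw'))]
              exact g7 w hw'
            · intro w hw0 hwpre
              have hwv : w ≠ v := fun h => hwpre (h ▸ List.mem_cons_self)
              have hwpreR : w ∉ preR := fun h => hwpre (List.mem_cons_of_mem _ h)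
              rw [pvGetSet _ v w [] [] hv0 (by rw [hAfl]; omega) hw0, if_neg hwv,
                g8 w hw0 hwpreR hwv,
                pvGetSet vals v w [b] [] hv0 (by omega) hw0, if_neg hwv]
          · rw [if_neg (by simpa using hflag), if_neg (by simpa using hflag)]
            refine ⟨by dsimp only; omega, g3, g4, g5, g6, ?_, ?_⟩
            · intro w hw hwv
              have hw' : w ∈ preR := by
                rcases List.mem_cons.1 hw with rfl | h; · exact absurd rfl hwv
                · exact h
              exact g7 w hw'
            · intro w hw0 hwpre
              have hwv : w ≠ v := fun h => hwpre (h ▸ List.mem_cons_self)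
              have hwpreR : w ∉ preR := fun h => hwpre (List.mem_cons_of_mem _ h)
              rw [g8 w hw0 hwpreR hwv,
                pvGetSet vals v w [b] [] hv0 (by omega) hw0, if_neg hwv]

-- ===== VERDICT (by name: the statement is the Claim_ definition above) =====
theorem min_operations_to_make_tree_good_spec : Claim_equal_min_operations_to_make_tree_good := by
  unfold Claim_equal_min_operations_to_make_tree_good
  intro n a edges _ hpre
  obtain ⟨hn, hrange, hbuild⟩ := hpre
  unfold Spec_min_operations_to_make_tree_good
  rw [pvBuildE_eq n a.length edges hn hrange, Option.isSome_iff_exists] at hbuild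
  obtain ⟨vis', hvis⟩ := hbuild
  have hGlen : (pvGraph n edges).length = n.toNat := pvGraph_length n edges
  obtain ⟨pre, _, _, _, _, hrangePre, hparts⟩ :=
    pvBigMain (pvGraph n edges) a (n.toNat + 1) 0 (-1) [] vis' hvis
  obtain ⟨hkeys, hfill, hcalc⟩ := hparts 0
  obtain ⟨hfl, hffr, hfbm⟩ := hfill (List.replicate n.toNat 0)
    (by simp [hGlen]) (Or.inl ⟨rfl, rfl⟩)
  obtain ⟨hc1, _, _, _, _, _, _⟩ := hcalc
    (pvFillA (pvGraph n edges) a (n.toNat + 1) 0 (-1) (List.replicate n.toNat 0))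
    (List.replicate n.toNat ([] : List Int)) 0
    (by simp [hGlen]) hfbm
    (fun w _ => pvGetDConst _ _ _ (fun y hy => List.eq_of_mem_replicate hy))
  unfold min_operations_to_make_tree_good min_operations_to_make_tree_good_alt
  rw [hc1]
  omega
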